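-- pv_equiv track=rewrite | github.com/guanqiao/python-wiki | src/pywiki/generators/docs/technical_design_spec_generator.py | _extract_tech_categories
-- ===== SOURCE A (Python) =====
-- def _extract_tech_categories(content: str) -> dict[str, list[str]]:
--     """提取技术分类"""
--     categories = {}
--     current_category = None
--
--     for line in content.split("\n"):
--         if line.startswith("### ") or line.startswith("## "):
--             current_category = line.lstrip("#").strip()
--             categories[current_category] = []
--         elif current_category and line.strip().startswith("- "):
--             tech = line.strip()[2:].strip()
--             categories[current_category].append(tech)
--
--     return categories
-- ===== SOURCE B (Python) =====
-- def _extract_tech_categories(content: str) -> dict[str, list[str]]: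
--     """提取技术分类 — section-chunking rewrite: split the lines into header-led
--     sections first, collect each section's bullets, then build the dict at the end."""
--     lines = content.split("\n")
--     # discard the preamble before the first header
--     while lines and not (lines[0].startswith("### ") or lines[0].startswith("## ")):
--         lines.pop(0)
--     pairs = []
--     while lines:
--         header = lines.pop(0)
--         name = header.lstrip("#").strip()
--         body = []
--         while lines and not (lines[0].startswith("### ") or lines[0].startswith("## ")):
--             body.append(lines.pop(0))
--         if name:
--             techs = [l.strip()[2:].strip() for l in body if l.strip().startswith("- ")]
--         else:
--             techs = []
--         pairs.append((name, techs))
--     return dict(pairs)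
-- ===== Notes on version B (the rewrite author's own statement) =====
-- stated objective: alternative
-- what changed: B splits the lines into header-led sections first (drop the preamble, then repeatedly peel a header and its body up to the next header), collects each section's bullets from its body slice, and builds the dict once from the (name, techs) pairs at the end, whereas A makes a single pass carrying a mutable dict plus a current-category variable.
import Mathlib
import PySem

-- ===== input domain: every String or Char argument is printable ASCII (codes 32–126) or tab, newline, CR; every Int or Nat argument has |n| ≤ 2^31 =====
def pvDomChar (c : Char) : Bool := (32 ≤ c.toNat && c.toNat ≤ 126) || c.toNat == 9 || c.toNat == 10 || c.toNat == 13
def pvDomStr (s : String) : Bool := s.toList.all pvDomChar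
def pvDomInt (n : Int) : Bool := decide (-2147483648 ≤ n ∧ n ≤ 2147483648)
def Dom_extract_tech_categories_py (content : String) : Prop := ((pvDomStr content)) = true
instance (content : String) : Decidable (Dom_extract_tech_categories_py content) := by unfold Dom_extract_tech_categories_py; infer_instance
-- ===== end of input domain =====

-- B re-chunks the lines into header-led sections and builds the dict once at the end,
-- instead of A's single pass carrying a dict and a current-category state (objective: alternative decomposition).

-- content.split("\n"); the separator "\n" is non-empty, so Python's split never raises and
-- PySem.Str.split? is always `some` here (the .getD [] default is never taken)
def pvLines (content : String) : List String := (PySem.Str.split? content "\n").getD []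

-- shared line-level expressions (identical subexpressions of both Python sources)
-- line.startswith("### ") or line.startswith("## ")
def pvIsHeader (l : String) : Bool :=
  PySem.Str.startswith l "### " || PySem.Str.startswith l "## "
-- line.lstrip("#").strip()  (lstrip with the single char "#" is exactly dropWhile (· == '#'))
def pvName (l : String) : String :=
  PySem.Str.strip (String.ofList (l.toList.dropWhile (· == '#')))
-- line.strip().startswith("- ")
def pvIsBullet (l : String) : Bool :=
  PySem.Str.startswith (PySem.Str.strip l) "- "
-- line.strip()[2:].strip()
def pvTech (l : String) : String :=
  PySem.Str.strip (PySem.Str.slice (PySem.Str.strip l) (some 2) none)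

-- ===== PORT A =====
-- A's loop body: state = (categories, current_category)
def pvStepA (st : PySem.Dict String (List String) × Option String) (line : String) :
    PySem.Dict String (List String) × Option String :=
  if pvIsHeader line then
    let c := pvName line
    (st.1.insert c [], some c)
  else
    match st.2 with
    | some c =>
        if (!(c == "")) && pvIsBullet line then
          (st.1.modify c [] (· ++ [pvTech line]), st.2)
        else st
    | none => st

def extract_tech_categories_py (content : String) : List (String × List String) :=
  (((pvLines content).foldl pvStepA (PySem.Dict.empty, none)).1).items

-- ===== PORT B =====
-- B's inner while-loop: peel off one section (header line + its body up to the next header)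
def pvSections (ls : List String) : List (String × List String) :=
  match ls with
  | [] => []
  | header :: rest =>
      let name := pvName header
      let techs :=
        if name == "" then []
        else ((rest.takeWhile (fun x => !pvIsHeader x)).filter pvIsBullet).map pvTech
      (name, techs) :: pvSections (rest.dropWhile (fun x => !pvIsHeader x))
termination_by ls.length
decreasing_by
  simpa using Nat.lt_succ_of_le (List.length_dropWhile_le _ _)

def extract_tech_categories_py_alt (content : String) : List (String × List String) :=
  (PySem.Dict.ofList
    (pvSections ((pvLines content).dropWhile (fun x => !pvIsHeader x)))).items

-- ===== PRECONDITION & SPEC =====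
def Spec_extract_tech_categories_py (content : String) (out : List (String × List String)) : Prop := out = extract_tech_categories_py_alt content
instance (content : String) (out : List (String × List String)) : Decidable (Spec_extract_tech_categories_py content out) := by unfold Spec_extract_tech_categories_py; infer_instance

-- ===== CLAIM (what is proved, stated in full; the proofs are below) =====
def Claim_equal_extract_tech_categories_py : Prop := ∀ (content : String), Dom_extract_tech_categories_py content → Spec_extract_tech_categories_py content (extract_tech_categories_py content)

-- ===== LEMMAS AND PROOFS =====

-- a non-header line with no current category is a no-op for A
theorem pvStepA_none_of_not_header {l : String} (h : pvIsHeader l = false)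
    (d : PySem.Dict String (List String)) : pvStepA (d, none) l = (d, none) := by
  simp [pvStepA, h]

-- A ignores everything before the first header
theorem pvFoldA_dropWhile (ls : List String) (d : PySem.Dict String (List String)) :
    ls.foldl pvStepA (d, none) =
      (ls.dropWhile (fun x => !pvIsHeader x)).foldl pvStepA (d, none) := by
  induction ls with
  | nil => rfl
  | cons l t ih =>
      by_cases h : pvIsHeader l = true
      · simp [h]
      · have h' : pvIsHeader l = false := by simpa using h
        simp [h', List.foldl_cons, pvStepA_none_of_not_header h', ih]

-- over a header-free body with empty current category, A does nothing
theorem pvFoldA_body_empty (body : List String)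
    (hb : ∀ x ∈ body, pvIsHeader x = false) (d : PySem.Dict String (List String)) :
    body.foldl pvStepA (d, some "") = (d, some "") := by
  induction body generalizing d with
  | nil => rfl
  | cons l t ih =>
      have hl := hb l (by simp)
      have ht : ∀ x ∈ t, pvIsHeader x = false := fun x hx => hb x (by simp [hx])
      simp [List.foldl_cons, pvStepA, hl, ih ht]

-- over a header-free body with current category c ≠ "", A appends exactly the bullets to c
theorem pvFoldA_body (body : List String)
    (hb : ∀ x ∈ body, pvIsHeader x = false) (c : String) (hc : ¬ c = "")
    (d : PySem.Dict String (List String)) (v : List String) :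
    body.foldl pvStepA (d.insert c v, some c) =
      (d.insert c (v ++ (body.filter pvIsBullet).map pvTech), some c) := by
  induction body generalizing v with
  | nil => simp
  | cons l t ih =>
      have hl := hb l (by simp)
      have ht : ∀ x ∈ t, pvIsHeader x = false := fun x hx => hb x (by simp [hx])
      by_cases hbl : pvIsBullet l = true
      · have hstep : pvStepA (d.insert c v, some c) l =
            (d.insert c (v ++ [pvTech l]), some c) := by
          simp [pvStepA, hl, hbl, hc, PySem.Dict.modify, PySem.Dict.insert_insert_self,
            PySem.Dict.getD_insert_self]
        rw [List.foldl_cons, hstep, ih ht]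
        simp [hbl]
      · have hbl' : pvIsBullet l = false := by simpa using hbl
        rw [List.foldl_cons]
        have hstep : pvStepA (d.insert c v, some c) l = (d.insert c v, some c) := by
          simp [pvStepA, hl, hbl']
        rw [hstep, ih ht]
        simp [hbl']

-- the tail left by dropWhile starts with a header (or is empty)
theorem pvDropWhile_shape (ls : List String) :
    ls.dropWhile (fun x => !pvIsHeader x) = [] ∨
      ∃ h t, ls.dropWhile (fun x => !pvIsHeader x) = h :: t ∧ pvIsHeader h = true := by
  induction ls with
  | nil => exact Or.inl rfl
  | cons l t ih =>
      by_cases hl : pvIsHeader l = true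
      · exact Or.inr ⟨l, t, by simp [hl], hl⟩
      · have hl' : pvIsHeader l = false := by simpa using hl
        simpa [List.dropWhile_cons, hl'] using ih

-- main invariant: from any state, A's fold over a header-led tail inserts exactly B's sections
theorem pvFoldA_sections (n : Nat) : ∀ ls : List String, ls.length ≤ n →
    (ls = [] ∨ ∃ h t, ls = h :: t ∧ pvIsHeader h = true) →
    ∀ (d : PySem.Dict String (List String)) (cur : Option String),
    (ls.foldl pvStepA (d, cur)).1 =
      (pvSections ls).foldl (fun acc p => acc.insert p.1 p.2) d := by
  induction n with
  | zero =>
      intro ls hlen hshape d cur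
      interval_cases h : ls.length
      · simp [List.length_eq_zero_iff.mp h, pvSections]
  | succ n ih =>
      intro ls hlen hshape d cur
      rcases hshape with h0 | ⟨h, t, rfl, hh⟩
      · simp [h0, pvSections]
      · rw [pvSections]
        rw [List.foldl_cons]
        have hstep : pvStepA (d, cur) h = (d.insert (pvName h) [], some (pvName h)) := by
          simp [pvStepA, hh]
        rw [hstep]
        have hsplit : t = t.takeWhile (fun x => !pvIsHeader x) ++
            t.dropWhile (fun x => !pvIsHeader x) := (List.takeWhile_append_dropWhile).symm
        rw [hsplit, List.foldl_append]
        have hbmem : ∀ x ∈ t.takeWhile (fun x => !pvIsHeader x), pvIsHeader x = false := by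
          intro x hx
          have := List.mem_takeWhile_imp hx
          simpa using this
        have hafterlen : (t.dropWhile (fun x => !pvIsHeader x)).length ≤ n := by
          have h1 := List.length_dropWhile_le (fun x => !pvIsHeader x) t
          have h2 : t.length + 1 ≤ n + 1 := by simpa using hlen
          omega
        have hafter := pvDropWhile_shape t
        by_cases hc : pvName h = ""
        · rw [hc]
          rw [pvFoldA_body_empty _ hbmem]
          rw [ih _ hafterlen hafter]
          simp [List.foldl_cons]
        · rw [pvFoldA_body _ hbmem _ hc d []]
          rw [ih _ hafterlen hafter]
          have : (pvName h == "") = false := by simpa using hc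
          simp [List.foldl_cons, this]

-- ===== VERDICT (by name: the statement is the Claim_ definition above) =====
theorem extract_tech_categories_py_spec : Claim_equal_extract_tech_categories_py := by
  intro content _
  unfold Spec_extract_tech_categories_py extract_tech_categories_py extract_tech_categories_py_alt
  rw [pvFoldA_dropWhile]
  rw [pvFoldA_sections ((pvLines content).dropWhile (fun x => !pvIsHeader x)).length
      _ le_rfl (pvDropWhile_shape _)]
  rfl
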